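-- pv_equiv track=rewrite | github.com/stnxo2023/garak | garak/resources/smuggling/smuggle_ascii.py | sneaky_bits_smuggling
-- ===== SOURCE A (Python) =====
-- def sneaky_bits_smuggling(payload: str):
--     """
--     Use Sneaky Bits as described by Johann Rehberger in
--     https://embracethered.com/blog/posts/2025/sneaky-bits-and-ascii-smuggler/ to encode
--     ASCII characters using invisible times (U+2062) and invisible plus (U+2064) to encode 0 and 1.
--
--     We replace spaces with zero-width space (U+200B).
--
--     Args:
--         payload (str): Payload to be encoded
--
--     Returns:
--         encoded_payload (str): Payload encoded as binary, joined by zero-width spaces.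
--     """
--     char_map = {"0": chr(0x2062), "1": chr(0x2064)}
--     encoded_payload = list()
--     for ch in payload:
--         if ord(ch) == 0x20:
--             encoded_payload.append(chr(0x200B))
--         else:
--             for rep in bin(ord(ch)).removeprefix("0b"):
--                 encoded_payload.append(char_map[rep])
--     return "".join(encoded_payload)
-- ===== SOURCE B (Python) =====
-- def sneaky_bits_smuggling(payload: str):
--     """Encode payload with Sneaky Bits: bits are computed arithmetically
--     (repeated halving, building the bit string back-to-front) instead of
--     parsing bin()'s text through a dict."""
--     def enc(n):
--         bits = ""
--         while n:
--             bits = chr(0x2062 + 2 * (n & 1)) + bits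
--             n >>= 1
--         return bits
--     return "".join(chr(0x200B) if ch == " " else enc(ord(ch)) for ch in payload)
-- ===== Notes on version B (the rewrite author's own statement) =====
-- stated objective: alternative
-- what changed: B computes each character's bit string arithmetically (repeated halving building the bits back-to-front) and joins via a generator, instead of A's dict lookup over the text of bin() accumulated into a list.
import Mathlib
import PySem

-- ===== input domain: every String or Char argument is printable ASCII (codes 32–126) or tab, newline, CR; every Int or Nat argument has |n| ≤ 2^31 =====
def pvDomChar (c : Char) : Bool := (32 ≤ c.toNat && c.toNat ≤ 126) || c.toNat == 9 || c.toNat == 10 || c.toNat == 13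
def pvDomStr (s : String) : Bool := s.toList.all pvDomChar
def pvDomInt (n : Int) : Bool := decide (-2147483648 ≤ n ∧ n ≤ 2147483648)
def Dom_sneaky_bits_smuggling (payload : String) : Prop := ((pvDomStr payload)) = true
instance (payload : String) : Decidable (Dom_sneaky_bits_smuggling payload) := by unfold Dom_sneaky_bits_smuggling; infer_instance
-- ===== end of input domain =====

-- B computes each character's bits arithmetically (repeated halving, building the bit
-- string back-to-front) instead of parsing bin()'s text through a dict: an alternative
-- decomposition of the same O(n) encoding.

-- ===== PORT A =====
-- bin(n).removeprefix("0b") for n ≥ 1, hand-ported digit by digit (exact for n ≥ 1)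
def pvBinGo (n : Nat) : List Char :=
  if _h : n = 0 then [] else pvBinGo (n / 2) ++ [if n % 2 = 1 then '1' else '0']
  decreasing_by exact Nat.div_lt_self (Nat.pos_of_ne_zero _h) (by norm_num)

-- bin(n).removeprefix("0b") for any n ≥ 0 (bin(0) = "0b0")
def pvBin (n : Nat) : List Char := if n = 0 then ['0'] else pvBinGo n

def sneaky_bits_smuggling (payload : String) : String :=
  let char_map : PySem.Dict String String :=
    PySem.Dict.ofList [("0", String.ofList [Char.ofNat 0x2062]), ("1", String.ofList [Char.ofNat 0x2064])]
  let encoded_payload : List String :=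
    payload.toList.foldl (fun acc ch =>
      if ch.toNat = 0x20 then acc ++ [String.ofList [Char.ofNat 0x200B]]
      else acc ++ (pvBin ch.toNat).map
        -- char_map[rep]: the key is always present ('0'/'1'), so getD's default is never used
        (fun rep => (char_map.get? (String.ofList [rep])).getD ""))
      []
  PySem.Str.join "" encoded_payload

-- ===== PORT B =====
-- the while loop of enc: bits built back-to-front by repeated halving
def pvEncGo (n : Nat) (bits : List Char) : List Char :=
  if _h : n = 0 then bits else pvEncGo (n / 2) (Char.ofNat (0x2062 + 2 * (n % 2)) :: bits)
  decreasing_by exact Nat.div_lt_self (Nat.pos_of_ne_zero _h) (by norm_num)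

def sneaky_bits_smuggling_alt (payload : String) : String :=
  PySem.Str.join "" (payload.toList.map (fun ch =>
    if ch = ' ' then String.ofList [Char.ofNat 0x200B] else String.ofList (pvEncGo ch.toNat [])))

-- ===== PRECONDITION & SPEC =====
def Spec_sneaky_bits_smuggling (payload : String) (out : String) : Prop := out = sneaky_bits_smuggling_alt payload
instance (payload : String) (out : String) : Decidable (Spec_sneaky_bits_smuggling payload out) := by unfold Spec_sneaky_bits_smuggling; infer_instance

-- ===== CLAIM (what is proved, stated in full; the proofs are below) =====
def Claim_equal_sneaky_bits_smuggling : Prop := ∀ (payload : String), Dom_sneaky_bits_smuggling payload → Spec_sneaky_bits_smuggling payload (sneaky_bits_smuggling payload)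

-- ===== LEMMAS AND PROOFS =====

theorem intercalate_nil_sep (xs : List (List Char)) : List.intercalate ([] : List Char) xs = xs.flatten := by
  induction xs with
  | nil => rfl
  | cons x xs ih =>
    cases xs with
    | nil => simp [List.intercalate]
    | cons y ys =>
      simp only [List.intercalate, List.intersperse] at *
      simp_all

-- A's per-character contribution, flattened to chars
def pvAMap (rep : Char) : String :=
  ((PySem.Dict.ofList [("0", String.ofList [Char.ofNat 0x2062]), ("1", String.ofList [Char.ofNat 0x2064])]).get?
    (String.ofList [rep])).getD ""

theorem encGo_eq_bin (n : Nat) (bits : List Char) (hn : n ≠ 0) :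
    pvEncGo n bits = ((pvBinGo n).map (fun rep => (pvAMap rep).toList)).flatten ++ bits := by
  induction n using Nat.strong_induction_on generalizing bits with
  | _ n ih =>
    rw [pvEncGo, pvBinGo]
    simp only [hn, dite_false]
    by_cases h2 : n / 2 = 0
    · rw [pvEncGo, pvBinGo]
      simp only [h2, dite_true]
      have hx0 : (pvAMap '0').toList = [Char.ofNat 0x2062] := by decide
      have hx1 : (pvAMap '1').toList = [Char.ofNat 0x2064] := by decide
      rcases Nat.mod_two_eq_zero_or_one n with hm | hm <;>
        simp [hm, pvAMap] at hx0 hx1 ⊢ <;> simp [hx0, hx1]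
    · rw [ih (n / 2) (Nat.div_lt_self (Nat.pos_of_ne_zero hn) (by norm_num)) _ h2]
      have hx0 : (pvAMap '0').toList = [Char.ofNat 0x2062] := by decide
      have hx1 : (pvAMap '1').toList = [Char.ofNat 0x2064] := by decide
      rcases Nat.mod_two_eq_zero_or_one n with hm | hm <;>
        simp [hm, pvAMap] at hx0 hx1 ⊢ <;> simp [hx0, hx1]

theorem char_block_eq (ch : Char) (h : ch.toNat ≠ 0) :
    ((pvBin ch.toNat).map (fun rep => (pvAMap rep).toList)).flatten = pvEncGo ch.toNat [] := by
  rw [pvBin, if_neg h, encGo_eq_bin _ _ h, List.append_nil]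

theorem foldl_join (l : List Char) (acc : List String)
    (hl : ∀ c ∈ l, c.toNat ≠ 0) :
    ((l.foldl (fun acc ch =>
        if ch.toNat = 0x20 then acc ++ [String.ofList [Char.ofNat 0x200B]]
        else acc ++ (pvBin ch.toNat).map pvAMap) acc).map String.toList).flatten
    = (acc.map String.toList).flatten
      ++ ((l.map (fun ch => if ch = ' ' then String.ofList [Char.ofNat 0x200B]
            else String.ofList (pvEncGo ch.toNat []))).map String.toList).flatten := by
  induction l generalizing acc with
  | nil => simp
  | cons c cs ih =>
    simp only [List.foldl_cons, List.map_cons, List.flatten_cons]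
    rw [ih _ (fun x hx => hl x (List.mem_cons_of_mem _ hx))]
    by_cases hsp : c.toNat = 0x20
    · have hc : c = ' ' := by
        have := Char.ofNat_toNat c; rw [hsp] at this; exact this.symm
      simp [hc]
    · have hc : ¬ (c = ' ') := fun h => hsp (by rw [h]; rfl)
      simp only [hsp, if_false, hc, if_false]
      rw [List.map_append, List.flatten_append, List.map_map]
      have hb := char_block_eq c (hl c (List.mem_cons_self ..))
      simp only [Function.comp_def, hb]
      have hmk : (String.ofList (pvEncGo c.toNat [])).toList = pvEncGo c.toNat [] := String.toList_ofList
      simp [List.append_assoc, hmk]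

-- ===== VERDICT (by name: the statement is the Claim_ definition above) =====
theorem sneaky_bits_smuggling_spec : Claim_equal_sneaky_bits_smuggling := by
  intro payload hdom
  show _ = _
  unfold sneaky_bits_smuggling sneaky_bits_smuggling_alt
  simp only [PySem.Str.join]
  congr 1
  simp only [PySem.Chars.join, String.toList_empty, intercalate_nil_sep]
  have hl : ∀ c ∈ payload.toList, c.toNat ≠ 0 := by
    intro c hc
    have := hdom
    unfold Dom_sneaky_bits_smuggling pvDomStr at this
    have h := List.all_eq_true.mp this c hc
    unfold pvDomChar at h
    simp only [Bool.or_eq_true, Bool.and_eq_true, decide_eq_true_eq, beq_iff_eq] at h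
    omega
  have := foldl_join payload.toList [] hl
  simpa [pvAMap] using this
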